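-- pv_equiv track=rewrite | github.com/cyeinfpro/Realm | panel/app/services/netmon.py | _netmon_chunk
-- ===== SOURCE A (Python) =====
-- from typing import Any, Dict, List, Optional, Tuple
--
-- def _netmon_chunk(items: List[Optional[str]], size: int) -> List[List[str]]:
--     out: List[List[str]] = []
--     buf: List[str] = []
--     for x in items:
--         if x is None:
--             continue
--         s = str(x)
--         if not s:
--             continue
--         buf.append(s)
--         if len(buf) >= size:
--             out.append(buf)
--             buf = []
--     if buf:
--         out.append(buf)
--     return out
-- ===== SOURCE B (Python) =====
-- from typing import Any, Dict, List, Optional, Tuple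
--
-- def _netmon_chunk(items: List[Optional[str]], size: int) -> List[List[str]]:
--     filtered = [str(x) for x in items if x is not None and str(x)]
--     step = size if size > 0 else 1
--     out: List[List[str]] = []
--     while filtered:
--         out.append(filtered[:step])
--         filtered = filtered[step:]
--     return out
-- ===== Notes on version B (the rewrite author's own statement) =====
-- stated objective: alternative
-- what changed: B replaces A's single pass with a mutable buffer that is flushed whenever it reaches size by a two-phase decomposition: first a comprehension builds the filtered list of non-None non-empty strings, then a loop slices it off the front in groups of step = size if size > 0 else 1 (one element per group when size <= 0, matching A).
import Mathlib
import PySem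

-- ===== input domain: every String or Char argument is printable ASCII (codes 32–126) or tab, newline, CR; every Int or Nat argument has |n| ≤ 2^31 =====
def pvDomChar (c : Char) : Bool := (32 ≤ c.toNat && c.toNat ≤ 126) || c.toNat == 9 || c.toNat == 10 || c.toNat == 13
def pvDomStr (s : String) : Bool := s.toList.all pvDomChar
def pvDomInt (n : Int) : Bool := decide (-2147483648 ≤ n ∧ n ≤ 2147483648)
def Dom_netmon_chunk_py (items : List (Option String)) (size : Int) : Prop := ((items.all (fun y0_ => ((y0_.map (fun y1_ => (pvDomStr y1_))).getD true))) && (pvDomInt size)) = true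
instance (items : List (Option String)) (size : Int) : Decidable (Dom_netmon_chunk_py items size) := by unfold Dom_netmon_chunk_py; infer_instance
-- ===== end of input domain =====

-- B rewrites A's single-pass buffer-flush loop as filter-then-slice: build the filtered
-- list once, then cut it off the front in groups of step = (size if size > 0 else 1);
-- same return value, different decomposition (objective: alternative).

-- ===== PORT A =====
-- literal transliteration of A: one fold over items carrying (out, buf), flushing buf
-- whenever len(buf) >= size after an append; trailing non-empty buf appended at the end.
def netmon_chunk_py (items : List (Option String)) (size : Int) : List (List String) :=
  let st := items.foldl
    (fun (st : List (List String) × List String) x =>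
      match x with
      | none => st
      | some s =>
        if s = "" then st
        else
          let buf' := st.2 ++ [s]
          if (buf'.length : Int) ≥ size then (st.1 ++ [buf'], ([] : List String))
          else (st.1, buf'))
    ([], [])
  if st.2 = [] then st.1 else st.1 ++ [st.2]

-- ===== PORT B =====
-- Source B's while loop: out.append(filtered[:step]); filtered = filtered[step:]
def bChunks (step : Int) (hstep : 0 < step) (l : List String) : List (List String) :=
  if h : l = [] then []
  else
    PySem.List.slice l none (some step) :: bChunks step hstep (PySem.List.slice l (some step) none)
termination_by l.length
decreasing_by
  rw [PySem.List.slice_from l (le_of_lt hstep)]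
  cases l with
  | nil => exact absurd rfl h
  | cons a t =>
    simp only [List.length_drop, List.length_cons]
    omega

def netmon_chunk_py_alt (items : List (Option String)) (size : Int) : List (List String) :=
  let filtered := items.filterMap
    (fun x => match x with
      | none => none
      | some s => if s = "" then none else some s)
  bChunks (if size > 0 then size else 1) (by split <;> omega) filtered

-- ===== PRECONDITION & SPEC =====
def Spec_netmon_chunk_py (items : List (Option String)) (size : Int) (out : List (List String)) : Prop := out = netmon_chunk_py_alt items size
instance (items : List (Option String)) (size : Int) (out : List (List String)) : Decidable (Spec_netmon_chunk_py items size out) := by unfold Spec_netmon_chunk_py; infer_instance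

-- ===== CLAIM (what is proved, stated in full; the proofs are below) =====
def Claim_equal_netmon_chunk_py : Prop := ∀ (items : List (Option String)) (size : Int), Dom_netmon_chunk_py items size → Spec_netmon_chunk_py items size (netmon_chunk_py items size)

-- ===== LEMMAS AND PROOFS =====

-- A's fold step, restricted to the (non-empty) strings that survive the filter
def stepA (size : Int) (st : List (List String) × List String) (s : String) :
    List (List String) × List String :=
  let buf' := st.2 ++ [s]
  if (buf'.length : Int) ≥ size then (st.1 ++ [buf'], ([] : List String))
  else (st.1, buf')

lemma foldA_eq_foldl_filterMap (size : Int) (items : List (Option String))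
    (st : List (List String) × List String) :
    items.foldl
      (fun (st : List (List String) × List String) x =>
        match x with
        | none => st
        | some s =>
          if s = "" then st
          else
            let buf' := st.2 ++ [s]
            if (buf'.length : Int) ≥ size then (st.1 ++ [buf'], ([] : List String))
            else (st.1, buf'))
      st
    = (items.filterMap
        (fun x => match x with
          | none => none
          | some s => if s = "" then none else some s)).foldl (stepA size) st := by
  induction items generalizing st with
  | nil => rfl
  | cons x t ih =>
    cases x with
    | none => simpa using ih st
    | some s =>
      by_cases hs : s = "" <;> simpa [hs, stepA] using ih _

lemma bChunks_nil (step : Int) (hstep : 0 < step) : bChunks step hstep [] = [] := by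
  rw [bChunks.eq_def]; rfl

lemma bChunks_cons (step : Int) (hstep : 0 < step) (l : List String) (hl : l ≠ []) :
    bChunks step hstep l = l.take step.toNat :: bChunks step hstep (l.drop step.toNat) := by
  rw [bChunks.eq_def, dif_neg hl,
    PySem.List.slice_to l (le_of_lt hstep), PySem.List.slice_from l (le_of_lt hstep)]

lemma main_invariant (size step : Int) (hstep : 0 < step)
    (hs : step = if size > 0 then size else 1) :
    ∀ (l : List String) (out : List (List String)) (buf : List String),
      buf.length < step.toNat →
      (let r := l.foldl (stepA size) (out, buf)
       if r.2 = [] then r.1 else r.1 ++ [r.2]) = out ++ bChunks step hstep (buf ++ l) := by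
  intro l
  induction l with
  | nil =>
    intro out buf hbuf
    simp only [List.foldl_nil, List.append_nil]
    by_cases hb : buf = []
    · simp [hb, bChunks_nil]
    · rw [bChunks_cons step hstep buf hb]
      have htake : buf.take step.toNat = buf := List.take_of_length_le (by omega)
      have hdrop : buf.drop step.toNat = [] := List.drop_eq_nil_of_le (by omega)
      simp [hb, htake, hdrop, bChunks_nil]
  | cons s t ih =>
    intro out buf hbuf
    simp only [List.foldl_cons]
    by_cases hc : ((buf ++ [s]).length : Int) ≥ size
    · have hc' : size ≤ (buf.length : Int) + 1 := by
        simpa using hc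
      have hst : stepA size (out, buf) s = (out ++ [buf ++ [s]], []) := by
        simp [stepA, hc']
      rw [hst]
      have hlen : (buf ++ [s]).length = step.toNat := by
        by_cases hpos : 0 < size
        · have hse : step = size := by rw [hs]; simp [hpos]
          subst hse
          simp only [List.length_append, List.length_cons, List.length_nil]
          omega
        · have hse : step = 1 := by rw [hs]; simp [hpos]
          subst hse
          simp only [List.length_append, List.length_cons, List.length_nil]
          simp only [Int.toNat_one] at hbuf ⊢
          omega
      have ih' := ih (out ++ [buf ++ [s]]) [] (by simp only [List.length_nil]; omega)
      simp only [List.nil_append] at ih'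
      rw [ih']
      have hsplit : buf ++ s :: t = (buf ++ [s]) ++ t := by simp
      rw [hsplit, bChunks_cons step hstep ((buf ++ [s]) ++ t) (by simp),
        List.take_left' hlen, List.drop_left' hlen]
      simp
    · have hc' : ¬ size ≤ (buf.length : Int) + 1 := by
        simpa using hc
      have hst : stepA size (out, buf) s = (out, buf ++ [s]) := by
        simp [stepA, hc']
      rw [hst]
      have hsizepos : 0 < size := by by_contra hnp; exact hc' (by omega)
      have hstep_eq : step = size := by rw [hs]; simp [hsizepos]
      have hbuf' : (buf ++ [s]).length < step.toNat := by
        simp only [List.length_append, List.length_cons, List.length_nil]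
        subst hstep_eq
        omega
      have ih' := ih out (buf ++ [s]) hbuf'
      rw [ih']
      simp

-- ===== VERDICT (by name: the statement is the Claim_ definition above) =====
theorem netmon_chunk_py_spec : Claim_equal_netmon_chunk_py := by
  intro items size _
  unfold Spec_netmon_chunk_py netmon_chunk_py netmon_chunk_py_alt
  rw [foldA_eq_foldl_filterMap]
  have hstep : (0 : Int) < (if size > 0 then size else 1) := by split <;> omega
  have := main_invariant size (if size > 0 then size else 1) hstep rfl
    (items.filterMap
      (fun x => match x with
        | none => none
        | some s => if s = "" then none else some s)) [] [] (by simpa using hstep)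
  simpa using this
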